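-- pv_equiv track=rewrite | github.com/TabishA/cgpunet | cgp_2_dag.py | increment_duplicate_index
-- ===== SOURCE A (Python) =====
-- def increment_duplicate_index(elem, i):
--     sub_elems = elem.split('_')
--     if len(sub_elems) == 1:
--         return elem + str(i)
--     else:
--         out = sub_elems[0]
--         for j in range(1, len(sub_elems)):
--             out = out + '_' + sub_elems[j]
--             if j == 1: out = out + str(i)
--         return out
-- ===== SOURCE B (Python) =====
-- def increment_duplicate_index(elem, i):
--     idx = elem.find('_')
--     if idx == -1:
--         return elem + str(i)
--     idx2 = elem.find('_', idx + 1)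
--     if idx2 == -1:
--         return elem + str(i)
--     return elem[:idx2] + str(i) + elem[idx2:]
-- ===== Notes on version B (the rewrite author's own statement) =====
-- stated objective: alternative
-- what changed: Instead of splitting the string on '_' into a list and re-joining it piece by piece in a loop, B locates the second underscore directly with str.find and inserts str(i) by a single slice (appending at the end when there are fewer than two underscores).
import Mathlib
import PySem

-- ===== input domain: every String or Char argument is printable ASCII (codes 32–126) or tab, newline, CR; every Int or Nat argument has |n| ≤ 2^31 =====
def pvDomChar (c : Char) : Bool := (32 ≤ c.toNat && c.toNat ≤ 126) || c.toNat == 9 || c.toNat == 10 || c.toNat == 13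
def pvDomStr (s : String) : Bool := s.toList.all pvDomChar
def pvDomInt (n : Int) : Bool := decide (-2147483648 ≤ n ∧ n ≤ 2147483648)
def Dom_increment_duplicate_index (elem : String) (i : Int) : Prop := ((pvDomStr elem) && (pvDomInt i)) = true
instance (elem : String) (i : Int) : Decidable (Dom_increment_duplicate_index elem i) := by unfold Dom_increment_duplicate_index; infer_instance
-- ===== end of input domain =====

-- B replaces A's split('_')/rebuild loop by locating the second underscore with str.find
-- and slicing once around it (objective: alternative; same result, no list of pieces built).

-- ===== PORT A =====
def increment_duplicate_index (elem : String) (i : Int) : String :=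
  let sub_elems := PySem.Chars.splitOn elem.toList ['_']
  if PySem.List.len sub_elems = 1 then
    String.ofList (elem.toList ++ PySem.Int.toChars i)
  else
    let out0 := PySem.List.pyGetD sub_elems 0 []
    let out :=
      (PySem.List.pyRange 1 (PySem.List.len sub_elems)).foldl
        (fun out j =>
          let out := out ++ ['_'] ++ PySem.List.pyGetD sub_elems j []
          if j = 1 then out ++ PySem.Int.toChars i else out) out0
    String.ofList out


-- ===== PORT B =====
def increment_duplicate_index_alt (elem : String) (i : Int) : String :=
  let cs := elem.toList
  let idx := PySem.Chars.find cs ['_']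
  if idx = -1 then String.ofList (cs ++ PySem.Int.toChars i)
  else
    let idx2 := PySem.Chars.findFrom cs ['_'] (idx + 1)
    if idx2 = -1 then String.ofList (cs ++ PySem.Int.toChars i)
    else
      String.ofList (PySem.List.slice cs none (some idx2) ++ PySem.Int.toChars i
        ++ PySem.List.slice cs (some idx2) none)

-- ===== PRECONDITION & SPEC =====
def Spec_increment_duplicate_index (elem : String) (i : Int) (out : String) : Prop := out = increment_duplicate_index_alt elem i
instance (elem : String) (i : Int) (out : String) : Decidable (Spec_increment_duplicate_index elem i out) := by unfold Spec_increment_duplicate_index; infer_instance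

-- ===== CLAIM (what is proved, stated in full; the proofs are below) =====
def Claim_equal_increment_duplicate_index : Prop := ∀ (elem : String) (i : Int), Dom_increment_duplicate_index elem i → Spec_increment_duplicate_index elem i (increment_duplicate_index elem i)

-- ===== LEMMAS AND PROOFS =====
def pvSplitU : List Char → List (List Char)
  | [] => [[]]
  | c :: r =>
    if c = '_' then [] :: pvSplitU r
    else
      match pvSplitU r with
      | [] => [[c]]
      | h :: t => (c :: h) :: t

theorem pvSplitU_ne_nil (l : List Char) : pvSplitU l ≠ [] := by
  cases l with
  | nil => simp [pvSplitU]
  | cons c r =>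
    simp only [pvSplitU]
    split
    · simp
    · split <;> simp

theorem pvGo_eq' (l : List Char) : ∀ (fuel : Nat) (cur : List Char) (acc : List (List Char)),
    l.length < fuel →
    PySem.Chars.splitOn.go ['_'] fuel l cur acc
      = acc.reverse ++ (pvSplitU l).modifyHead (cur.reverse ++ ·) := by
  induction l with
  | nil =>
    intro fuel cur acc h
    match fuel with
    | f + 1 => simp [PySem.Chars.splitOn.go, pvSplitU]
  | cons c r ih =>
    intro fuel cur acc h
    match fuel with
    | f + 1 =>
      by_cases hc : c = '_'
      · subst hc
        have : (['_'] : List Char).isPrefixOf ('_' :: r) = true := by simp [List.isPrefixOf]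
        simp only [PySem.Chars.splitOn.go, this, if_pos, List.length_cons, List.length_nil,
          List.drop_succ_cons, List.drop_zero]
        rw [ih f [] (cur.reverse :: acc) (by simpa using Nat.lt_of_succ_lt_succ h)]
        simp [pvSplitU, List.modifyHead]
        cases hsp : pvSplitU r with
        | nil => exact absurd hsp (pvSplitU_ne_nil r)
        | cons a b => simp
      · have : (['_'] : List Char).isPrefixOf (c :: r) = false := by
          simp [List.isPrefixOf]; exact fun hh => absurd hh.symm hc
        simp only [PySem.Chars.splitOn.go, this]
        rw [ih f (c :: cur) acc (by simpa using Nat.lt_of_succ_lt_succ h)]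
        simp only [pvSplitU, if_neg hc]
        cases hsp : pvSplitU r with
        | nil => exact absurd hsp (pvSplitU_ne_nil r)
        | cons a b => simp

theorem pvSplitOn_eq (l : List Char) : PySem.Chars.splitOn l ['_'] = pvSplitU l := by
  rw [PySem.Chars.splitOn, pvGo_eq' l (l.length + 1) [] [] (Nat.lt_succ_self _)]
  cases hsp : pvSplitU l with
  | nil => exact absurd hsp (pvSplitU_ne_nil l)
  | cons a b => simp

theorem pvSplitU_free {l : List Char} (h : '_' ∉ l) : pvSplitU l = [l] := by
  induction l with
  | nil => rfl
  | cons c r ih =>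
    have hc : c ≠ '_' := fun hh => h (hh ▸ List.mem_cons_self)
    simp only [pvSplitU, if_neg hc, ih (fun hm => h (List.mem_cons_of_mem _ hm))]

theorem pvSplitU_app {p : List Char} (r : List Char) (h : '_' ∉ p) :
    pvSplitU (p ++ '_' :: r) = p :: pvSplitU r := by
  induction p with
  | nil => simp [pvSplitU]
  | cons c q ih =>
    have hc : c ≠ '_' := fun hh => h (hh ▸ List.mem_cons_self)
    have ihq := ih (fun hm => h (List.mem_cons_of_mem _ hm))
    simp only [List.cons_append, pvSplitU, if_neg hc, ihq]

theorem pvFlat (l : List Char) : (pvSplitU l).flatMap (fun s => '_' :: s) = '_' :: l := by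
  induction l with
  | nil => rfl
  | cons c r ih =>
    by_cases hc : c = '_'
    · subst hc; simp [pvSplitU, ih]
    · simp only [pvSplitU, if_neg hc]
      cases hsp : pvSplitU r with
      | nil => exact absurd hsp (pvSplitU_ne_nil r)
      | cons h t =>
        rw [hsp] at ih
        simp only [List.flatMap_cons] at ih ⊢
        have : h ++ t.flatMap (fun s => '_' :: s) = r := by
          simpa using ih
        simp [← this]

theorem pvFindGo_free {l : List Char} (h : '_' ∉ l) : ∀ k : Nat, PySem.Chars.find.go ['_'] l k = -1 := by
  induction l with
  | nil => intro k; simp [PySem.Chars.find.go]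
  | cons c r ih =>
    intro k
    have hc : c ≠ '_' := fun hh => h (hh ▸ List.mem_cons_self)
    have hpre : (['_'] : List Char).isPrefixOf (c :: r) = false := by
      simp [List.isPrefixOf]; exact fun hh => absurd hh.symm hc
    simp only [PySem.Chars.find.go, hpre]
    exact ih (fun hm => h (List.mem_cons_of_mem _ hm)) (k + 1)

theorem pvFindGo_at {p : List Char} (h : '_' ∉ p) (r : List Char) :
    ∀ k : Nat, PySem.Chars.find.go ['_'] (p ++ '_' :: r) k = (k : Int) + p.length := by
  induction p with
  | nil =>
    intro k
    have hpre : (['_'] : List Char).isPrefixOf ('_' :: r) = true := by simp [List.isPrefixOf]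
    simp [PySem.Chars.find.go, hpre]
  | cons c q ih =>
    intro k
    have hc : c ≠ '_' := fun hh => h (hh ▸ List.mem_cons_self)
    have hpre : (['_'] : List Char).isPrefixOf (c :: (q ++ '_' :: r)) = false := by
      simp [List.isPrefixOf]; exact fun hh => absurd hh.symm hc
    simp only [List.cons_append, PySem.Chars.find.go, hpre]
    rw [ih (fun hm => h (List.mem_cons_of_mem _ hm)) (k + 1)]
    simp only [List.length_cons]
    push_cast
    ring

theorem pvFind_free {l : List Char} (h : '_' ∉ l) : PySem.Chars.find l ['_'] = -1 := by
  rw [PySem.Chars.find]; exact pvFindGo_free h 0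

theorem pvFind_at {p : List Char} (r : List Char) (h : '_' ∉ p) :
    PySem.Chars.find (p ++ '_' :: r) ['_'] = p.length := by
  rw [PySem.Chars.find]; rw [pvFindGo_at h r 0]; simp

theorem pvDecomp (l : List Char) : '_' ∉ l ∨ ∃ p r, l = p ++ '_' :: r ∧ '_' ∉ p := by
  induction l with
  | nil => left; simp
  | cons c q ih =>
    by_cases hc : c = '_'
    · right; exact ⟨[], q, by simp [hc], by simp⟩
    · rcases ih with hfree | ⟨p, r, hpr, hp⟩
      · left
        intro hm
        rcases List.mem_cons.mp hm with hh | hh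
        · exact hc hh.symm
        · exact hfree hh
      · right
        exact ⟨c :: p, r, by simp [hpr], by
          simp [hp]; exact fun hh => hc hh.symm⟩

theorem main_eq (elem : String) (i : Int) :
    increment_duplicate_index elem i = increment_duplicate_index_alt elem i := by
  unfold increment_duplicate_index increment_duplicate_index_alt
  simp only []
  rcases pvDecomp elem.toList with hfree | ⟨p, r, hpr, hp⟩
  · -- Case 1: no underscore in elem
    rw [pvSplitOn_eq, pvSplitU_free hfree, pvFind_free hfree]
    simp [PySem.List.len]
  · rw [hpr, pvSplitOn_eq, pvSplitU_app r hp, pvFind_at r hp]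
    have hidx : ¬ ((p.length : Int) = -1) := by omega
    rw [if_neg hidx]
    have hcast : ((p.length : Int) + 1) = ((p.length + 1 : Nat) : Int) := by push_cast; ring
    rcases pvDecomp r with hr | ⟨m, q, hmq, hm⟩
    · -- Case 2: exactly one underscore
      rw [pvSplitU_free hr]
      have hk : p.length + 1 ≤ (p ++ '_' :: r).length := by simp
      rw [hcast, PySem.Chars.findFrom_natCast _ _ (p.length + 1) hk]
      have hdrop : List.drop (p.length + 1) (p ++ '_' :: r) = r := by
        have : p ++ '_' :: r = (p ++ ['_']) ++ r := by simp
        rw [this, List.drop_left' (by simp)]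
      rw [hdrop, pvFind_free hr, if_pos rfl]
      have hlen : ¬ (PySem.List.len [p, r] = 1) := by simp [PySem.List.len]
      rw [if_neg hlen]
      have hrange : PySem.List.pyRange 1 (PySem.List.len [p, r]) = [1] := by
        simp [PySem.List.len]; decide
      rw [hrange]
      simp [PySem.List.pyGetD, PySem.List.pyGet?, PySem.List.pyIdx?]
    · -- Case 3: at least two underscores
      subst hmq
      rw [pvSplitU_app q hm]
      have hk : p.length + 1 ≤ (p ++ '_' :: (m ++ '_' :: q)).length := by simp
      rw [hcast, PySem.Chars.findFrom_natCast _ _ (p.length + 1) hk]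
      have hdrop : List.drop (p.length + 1) (p ++ '_' :: (m ++ '_' :: q)) = m ++ '_' :: q := by
        have : p ++ '_' :: (m ++ '_' :: q) = (p ++ ['_']) ++ (m ++ '_' :: q) := by simp
        rw [this, List.drop_left' (by simp)]
      rw [hdrop, pvFind_at q hm]
      have hne2 : ¬ ((m.length : Int) = -1) := by omega
      rw [if_neg hne2]
      have hidx2 : ((p.length + 1 : Nat) : Int) + m.length = ((p.length + 1 + m.length : Nat) : Int) := by
        push_cast; ring
      rw [hidx2]
      have hne3 : ¬ (((p.length + 1 + m.length : Nat) : Int) = -1) := by omega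
      rw [if_neg hne3]
      -- B side: slices
      set cs := p ++ '_' :: (m ++ '_' :: q) with hcs
      have hsplit : cs = (p ++ '_' :: m) ++ ('_' :: q) := by simp [hcs]
      have hlen1 : (p ++ '_' :: m).length = p.length + 1 + m.length := by simp; omega
      have hslice1 : PySem.List.slice cs none (some ((p.length + 1 + m.length : Nat) : Int))
          = p ++ '_' :: m := by
        simp only [PySem.List.slice, PySem.List.clampIdx]
        norm_num
        rw [if_neg (by omega)]
        have ht : (↑p.length + 1 + ↑m.length : Int).toNat = p.length + 1 + m.length := by omega
        rw [ht]
        have hle : p.length + 1 + m.length ≤ cs.length := by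
          rw [hsplit, List.length_append, hlen1]
          omega
        rw [min_eq_left hle, hsplit, List.take_left' hlen1]
      have hslice2 : PySem.List.slice cs (some ((p.length + 1 + m.length : Nat) : Int)) none
          = '_' :: q := by
        simp only [PySem.List.slice, PySem.List.clampIdx]
        norm_num
        rw [if_neg (by omega)]
        have ht : (↑p.length + 1 + ↑m.length : Int).toNat = p.length + 1 + m.length := by omega
        rw [ht]
        have hle : p.length + 1 + m.length ≤ cs.length := by
          rw [hsplit, List.length_append, hlen1]
          omega
        rw [min_eq_left hle, hsplit, List.drop_left' hlen1]
        apply List.take_of_length_le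
        rw [List.length_append, hlen1]
        simp
      rw [hslice1, hslice2]
      -- A side: the loop
      have hlen : ¬ (PySem.List.len (p :: m :: pvSplitU q) = 1) := by
        simp only [PySem.List.len, List.length_cons]
        push_cast
        omega
      rw [if_neg hlen]
      have hgt : (1 : Int) < PySem.List.len (p :: m :: pvSplitU q) := by
        simp only [PySem.List.len, List.length_cons]
        push_cast
        omega
      rw [PySem.List.pyRange_one_cons hgt]
      simp only [List.foldl_cons]
      have h11 : (1 : Int) + 1 = 2 := by norm_num
      rw [h11]
      have hget1 : PySem.List.pyGetD (p :: m :: pvSplitU q) 1 [] = m := by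
        rw [PySem.List.pyGetD_ofNat']; rfl
      have hget0 : PySem.List.pyGetD (p :: m :: pvSplitU q) 0 [] = p := by
        rw [PySem.List.pyGetD_ofNat']; rfl
      simp only [reduceIte, hget0, hget1]
      -- remaining loop over j >= 2
      have hbody : List.foldl
          (fun out j =>
            if j = 1 then out ++ ['_'] ++ PySem.List.pyGetD (p :: m :: pvSplitU q) j [] ++ PySem.Int.toChars i
            else out ++ ['_'] ++ PySem.List.pyGetD (p :: m :: pvSplitU q) j [])
          (p ++ ['_'] ++ m ++ PySem.Int.toChars i)
          (PySem.List.pyRange 2 (PySem.List.len (p :: m :: pvSplitU q)))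
          = (p ++ ['_'] ++ m ++ PySem.Int.toChars i) ++ ('_' :: q) := by
        rw [PySem.List.foldl_congr_mem _ _
          (fun out j => out ++ ['_'] ++ PySem.List.pyGetD (p :: m :: pvSplitU q) j []) _
          (by
            intro acc x hx
            have hx2 : 2 ≤ x := (PySem.List.mem_pyRange_one.mp hx).1
            have hxne : ¬ (x = 1) := by omega
            simp [hxne])]
        rw [PySem.List.foldl_pyRange_pyGetD (p :: m :: pvSplitU q) []
          (fun acc x => acc ++ ['_'] ++ x) _ (by norm_num)]
        rw [PySem.List.foldl_congr_mem _ _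
          (fun acc x => acc ++ (['_'] ++ x)) _
          (by intro acc x _; simp)]
        rw [PySem.List.foldl_append_eq_flatMap]
        have h2 : Int.toNat 2 = 2 := rfl
        rw [h2, List.drop_succ_cons, List.drop_succ_cons, List.drop_zero]
        have hfl : List.flatMap (HAppend.hAppend ['_']) (pvSplitU q) = '_' :: q := by
          have := pvFlat q
          simpa using this
        rw [hfl]
      rw [hbody]
      simp

-- ===== VERDICT (by name: the statement is the Claim_ definition above) =====
theorem increment_duplicate_index_spec : Claim_equal_increment_duplicate_index := by
  intro elem i _
  unfold Spec_increment_duplicate_index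
  exact main_eq elem i
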